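-- pv_equiv track=rewrite | github.com/janhae4/PTTKGT | TKN.py | LIU
-- ===== SOURCE A (Python) =====
-- D = [
--     {
--         'TID': 'T1',
--         'Transaction': ['a', 'b', 'c', 'd'],
--         'Quantity': [1, 2, 2, 1],
--         'Profit': [4, 3, 1, -1]
--     },
--     {
--         'TID': 'T2',
--         'Transaction': ['a', 'b', 'c', 'd', 'e'],
--         'Quantity': [1, 3, 3, 2, 2],
--         'Profit': [4, 3, 1, -1, 2]
--     },
--     {
--         'TID': 'T3',
--         'Transaction': ['a', 'c', 'e'],
--         'Quantity': [1, 6, 3],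
--         'Profit': [4, 1, 2]
--     },
--     {
--         'TID': 'T4',
--         'Transaction': ['b', 'd', 'e'],
--         'Quantity': [3, 5, 2],
--         'Profit': [3, -1, 2]
--     },
--     {
--         'TID': 'T5',
--         'Transaction': ['b', 'c', 'd', 'e'],
--         'Quantity': [1, 5, 1, 4],
--         'Profit': [3, 1, -1, 2]
--     },
--     {
--         'TID': 'T6',
--         'Transaction': ['c', 'd', 'e'],
--         'Quantity': [2, 1, 1],
--         'Profit': [1, -1, 2]
--     }
-- ]
--
-- def iu(x, Tk):
--     return Tk["Quantity"][Tk["Transaction"].index(x)] if x in Tk["Transaction"] else 0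
--
-- def eu(x, Tk = None):
--     if Tk:
--         return Tk["Profit"][Tk["Transaction"].index(x)]
--     else:
--         for Tk in D:
--             if x in Tk["Transaction"]:
--                 return eu(x, Tk)
--     return 0
--
-- def u(X, Tk=None):
--     if Tk:
--         return sum(
--             iu(ix, Tk) * eu(ix, Tk)
--             for ix in X
--         )
--     else:
--         return sum(
--             u(X, Tk)
--             for Tk in D
--             if all(ix in Tk["Transaction"] for ix in X)
--         )
--
-- def LIU(x, y):
--     return  sum (
--         u(z, Tk)
--         for Tk in D
--         if all(item in Tk["Transaction"] for item in [x, y])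
--         for z in Tk["Transaction"]
--         if Tk["Transaction"].index(x) <= Tk["Transaction"].index(z) <= Tk["Transaction"].index(y)
--     )
-- ===== SOURCE B (Python) =====
-- D = [
--     {
--         'TID': 'T1',
--         'Transaction': ['a', 'b', 'c', 'd'],
--         'Quantity': [1, 2, 2, 1],
--         'Profit': [4, 3, 1, -1]
--     },
--     {
--         'TID': 'T2',
--         'Transaction': ['a', 'b', 'c', 'd', 'e'],
--         'Quantity': [1, 3, 3, 2, 2],
--         'Profit': [4, 3, 1, -1, 2]
--     },
--     {
--         'TID': 'T3',
--         'Transaction': ['a', 'c', 'e'],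
--         'Quantity': [1, 6, 3],
--         'Profit': [4, 1, 2]
--     },
--     {
--         'TID': 'T4',
--         'Transaction': ['b', 'd', 'e'],
--         'Quantity': [3, 5, 2],
--         'Profit': [3, -1, 2]
--     },
--     {
--         'TID': 'T5',
--         'Transaction': ['b', 'c', 'd', 'e'],
--         'Quantity': [1, 5, 1, 4],
--         'Profit': [3, 1, -1, 2]
--     },
--     {
--         'TID': 'T6',
--         'Transaction': ['c', 'd', 'e'],
--         'Quantity': [2, 1, 1],
--         'Profit': [1, -1, 2]
--     }
-- ]
--
-- def LIU(x, y):
--     total = 0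
--     for Tk in D:
--         T = Tk['Transaction']
--         if x in T and y in T:
--             i, j = T.index(x), T.index(y)
--             total += sum(q * p for q, p in
--                          zip(Tk['Quantity'][i:j + 1], Tk['Profit'][i:j + 1]))
--     return total
-- ===== Notes on version B (the rewrite author's own statement) =====
-- stated objective: simpler
-- what changed: Replaces the u/iu/eu helper recursion and the index-bound membership filter over all items with a single pass per transaction that sums Quantity[k]*Profit[k] over the contiguous slice between index(x) and index(y).
import Mathlib
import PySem

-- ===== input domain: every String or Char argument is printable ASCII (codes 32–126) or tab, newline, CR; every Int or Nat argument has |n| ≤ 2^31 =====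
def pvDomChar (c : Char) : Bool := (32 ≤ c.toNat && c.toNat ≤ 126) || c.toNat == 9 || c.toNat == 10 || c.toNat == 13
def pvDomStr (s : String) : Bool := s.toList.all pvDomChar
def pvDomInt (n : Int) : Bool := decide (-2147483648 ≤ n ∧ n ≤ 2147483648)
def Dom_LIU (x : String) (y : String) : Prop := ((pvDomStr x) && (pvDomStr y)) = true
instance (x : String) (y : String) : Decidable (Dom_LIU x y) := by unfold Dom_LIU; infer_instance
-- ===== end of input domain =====

-- B inlines the u/iu/eu helper recursion into one contiguous slice dot-product per
-- transaction (objective: simpler); return-value equivalence only, no mutation involved.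

-- ===== PORT A =====
-- the fixed dataset D: (Transaction, Quantity, Profit) per transaction
def pvD : List (List String × List Int × List Int) :=
  [ (["a","b","c","d"],     [1,2,2,1],   [4,3,1,-1]),
    (["a","b","c","d","e"], [1,3,3,2,2], [4,3,1,-1,2]),
    (["a","c","e"],         [1,6,3],     [4,1,2]),
    (["b","d","e"],         [3,5,2],     [3,-1,2]),
    (["b","c","d","e"],     [1,5,1,4],   [3,1,-1,2]),
    (["c","d","e"],         [2,1,1],     [1,-1,2]) ]

-- Tk["Transaction"].index(z) (only evaluated where z ∈ Transaction, so the getD 0 default is never used)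
def pvIdx (t : List String) (s : String) : Int := (PySem.List.index? t s).getD 0

-- iu(x, Tk)
def pvIu (x : String) (t : List String × List Int × List Int) : Int :=
  if x ∈ t.1 then (PySem.List.pyGet? t.2.1 (pvIdx t.1 x)).getD 0 else 0

-- eu(x, Tk) with Tk truthy (only reached with x ∈ Transaction, so pyGet? is some)
def pvEu (x : String) (t : List String × List Int × List Int) : Int :=
  (PySem.List.pyGet? t.2.2 (pvIdx t.1 x)).getD 0

-- u(z, Tk): Python iterates the CHARACTERS of the string z
def pvU (z : String) (t : List String × List Int × List Int) : Int :=
  (z.toList.map (fun c => String.ofList [c])).foldl (fun acc ix => acc + pvIu ix t * pvEu ix t) 0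

def LIU (x : String) (y : String) : Int :=
  pvD.foldl (fun acc t =>
    if x ∈ t.1 ∧ y ∈ t.1 then
      (t.1.filter (fun z =>
          decide (pvIdx t.1 x ≤ pvIdx t.1 z ∧ pvIdx t.1 z ≤ pvIdx t.1 y))).foldl
        (fun a z => a + pvU z t) acc
    else acc) 0

-- ===== PORT B =====
-- sum(q * p for q, p in zip(Quantity[i:j+1], Profit[i:j+1]))
def pvSpan (q p : List Int) (i j : Int) : Int :=
  (((PySem.List.slice q (some i) (some (j+1))).zip (PySem.List.slice p (some i) (some (j+1)))).map
      (fun qp => qp.1 * qp.2)).sum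

def LIU_alt (x : String) (y : String) : Int :=
  pvD.foldl (fun acc t =>
    if x ∈ t.1 ∧ y ∈ t.1 then
      acc + pvSpan t.2.1 t.2.2 (pvIdx t.1 x) (pvIdx t.1 y)
    else acc) 0

-- ===== PRECONDITION & SPEC =====
def Spec_LIU (x : String) (y : String) (out : Int) : Prop := out = LIU_alt x y
instance (x : String) (y : String) (out : Int) : Decidable (Spec_LIU x y out) := by unfold Spec_LIU; infer_instance

-- ===== CLAIM (what is proved, stated in full; the proofs are below) =====
def Claim_equal_LIU : Prop := ∀ (x : String) (y : String), Dom_LIU x y → Spec_LIU x y (LIU x y)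

-- ===== LEMMAS AND PROOFS =====
def pvItems : List String := ["a","b","c","d","e"]

lemma pv_foldl_id {α : Type} (l : List α) (f : Int → α → Int)
    (h : ∀ acc t, t ∈ l → f acc t = acc) : l.foldl f 0 = 0 := by
  induction l with
  | nil => rfl
  | cons a l ih =>
    simp only [List.foldl_cons, h 0 a (List.mem_cons_self ..)]
    exact ih (fun acc t ht => h acc t (List.mem_cons_of_mem _ ht))

lemma pv_zero_of_not_mem (x y : String)
    (h : x ∉ pvItems ∨ y ∉ pvItems) : LIU x y = 0 ∧ LIU_alt x y = 0 := by
  have hx : ∀ t ∈ pvD, ¬ (x ∈ t.1 ∧ y ∈ t.1) := by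
    intro t ht ⟨h1, h2⟩
    rcases h with h | h
    · apply h
      fin_cases ht <;> simp [pvItems] at h1 ⊢ <;> tauto
    · apply h
      fin_cases ht <;> simp [pvItems] at h2 ⊢ <;> tauto
  constructor
  · exact pv_foldl_id pvD _ (fun acc t ht => by rw [if_neg (hx t ht)])
  · exact pv_foldl_id pvD _ (fun acc t ht => by rw [if_neg (hx t ht)])

-- ===== VERDICT (by name: the statement is the Claim_ definition above) =====
theorem LIU_spec : Claim_equal_LIU := by
  intro x y _
  unfold Spec_LIU
  by_cases hx : x ∈ pvItems
  · by_cases hy : y ∈ pvItems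
    · fin_cases hx <;> fin_cases hy <;> decide
    · have := pv_zero_of_not_mem x y (Or.inr hy); omega
  · have := pv_zero_of_not_mem x y (Or.inl hx); omega
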